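-- pv_equiv track=rewrite | github.com/lucasalvesso/fundamentosad1 | q4.py | converte
-- ===== SOURCE A (Python) =====
-- def converte(numBinario, base):
--     cont = 0
--     numBinario = str(numBinario)
--     numConvertido = []
--     for i in range(len(numBinario)):
--         if cont == 0:
--             cont = (0 * base) + int(numBinario[i])
--         else:
--             cont = (cont * base) + int(numBinario[i])
--
--     for i in range(3, 11):
--         minimal = cont
--         total = []
--         while minimal > 0:
--             total.append(str(minimal % i))
--             minimal = minimal / i
--             minimal = int(minimal)
--         numConvertido.append("".join(total[::-1]))
--
--     numConvertido = " ".join(numConvertido)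
--     return numConvertido
-- ===== SOURCE B (Python) =====
-- def to_base(n, i):
--     # digits most-significant-first via recursion; int(n / i) (float division)
--     # exactly as the original uses
--     return '' if n <= 0 else to_base(int(n / i), i) + str(n % i)
--
-- def converte(numBinario, base):
--     cont = 0
--     for ch in str(numBinario):
--         cont = cont * base + int(ch)
--     return ' '.join(to_base(cont, i) for i in range(3, 11))
-- ===== Notes on version B (the rewrite author's own statement) =====
-- stated objective: simpler
-- what changed: The per-base while loop that collects remainders into a list, reverses it and joins is replaced by a recursive to_base helper that emits digits most-significant-first directly (no list, no reverse), and the redundant cont==0 branch in the Horner parse is dropped.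
import Mathlib
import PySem

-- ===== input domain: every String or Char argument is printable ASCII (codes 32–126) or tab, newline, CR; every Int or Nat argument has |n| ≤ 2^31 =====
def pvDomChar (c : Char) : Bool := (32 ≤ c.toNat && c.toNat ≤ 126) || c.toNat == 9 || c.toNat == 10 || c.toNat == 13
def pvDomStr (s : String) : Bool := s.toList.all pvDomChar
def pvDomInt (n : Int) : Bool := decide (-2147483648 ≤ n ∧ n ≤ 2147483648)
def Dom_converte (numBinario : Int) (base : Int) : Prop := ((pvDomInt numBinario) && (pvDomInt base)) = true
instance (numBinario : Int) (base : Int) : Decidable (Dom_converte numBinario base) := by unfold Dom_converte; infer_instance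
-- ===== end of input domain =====

-- B replaces A's per-base while-loop that builds a reversed digit list with a recursive
-- to_base helper emitting digits most-significant-first, and drops A's redundant cont==0
-- branch in the parse; objective: simpler, same cost.

-- Shared helper: exact model of CPython's int(n / i) for 0 ≤ n, 3 ≤ i ≤ 10
-- (IEEE-754 double division is correctly rounded to nearest-even; int() truncates;
-- no overflow on this domain). Both Pythons contain the very same expression int(n / i).
def pvRoundHalfEven (p d : Int) : Int :=
  let q := PySem.Int.floordiv p d
  let r := p - q * d
  if 2 * r < d then q else if d < 2 * r then q + 1
  else if PySem.Int.mod q 2 = 0 then q else q + 1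

def pvFloatIntDiv (n i : Int) : Int :=
  if n < i then 0
  else
    let e : Nat := (Int.toNat (PySem.Int.floordiv n i)).log2
    if e ≤ 52 then
      PySem.Int.floordiv (pvRoundHalfEven (n * 2 ^ (52 - e)) i) (2 ^ (52 - e))
    else
      pvRoundHalfEven n (i * 2 ^ (e - 52)) * 2 ^ (e - 52)

-- int(c) for a single character c; default unreachable under Pre_ (digits only)
def pvDigit (c : Char) : Int := (PySem.Int.ofChars? [c]).getD 0

-- ===== PORT A =====
-- the while loop: append str(minimal % i), then minimal = int(minimal / i);
-- fuel = minimal.toNat + 1 suffices since int(m / i) < m for m > 0, i ≥ 3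
def convWhile : Nat → Int → Int → List String → List String
  | 0, _, _, total => total
  | f + 1, minimal, i, total =>
    if minimal > 0 then
      convWhile f (pvFloatIntDiv minimal i) i (total ++ [PySem.Int.toStr (PySem.Int.mod minimal i)])
    else total

def converte (numBinario : Int) (base : Int) : String :=
  let s := PySem.Int.toChars numBinario
  let cont := s.foldl (fun cont c =>
    if cont = 0 then 0 * base + pvDigit c else cont * base + pvDigit c) 0
  let numConvertido := (PySem.List.pyRange 3 11 1).foldl (fun acc i =>
    -- total[::-1] is List.reverse (PySem.List.slice?_none_none_neg_one)
    acc ++ [PySem.Str.join "" (convWhile (cont.toNat + 1) cont i []).reverse]) []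
  PySem.Str.join " " numConvertido

-- ===== PORT B =====
def toBase : Nat → Int → Int → String
  | 0, _, _ => ""
  | f + 1, n, i =>
    if n ≤ 0 then "" else toBase f (pvFloatIntDiv n i) i ++ PySem.Int.toStr (PySem.Int.mod n i)

def converte_alt (numBinario : Int) (base : Int) : String :=
  let cont := (PySem.Int.toChars numBinario).foldl (fun cont c => cont * base + pvDigit c) 0
  PySem.Str.join " " ((PySem.List.pyRange 3 11 1).map (fun i => toBase (cont.toNat + 1) cont i))

-- ===== PRECONDITION & SPEC =====
-- Pre_ excludes negative numBinario, on which both Pythons raise ValueError (int('-')).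
def Pre_converte (numBinario : Int) (base : Int) : Prop := 0 ≤ numBinario
instance (numBinario : Int) (base : Int) : Decidable (Pre_converte numBinario base) := by
  unfold Pre_converte; infer_instance

def pvWitness_converte : Int × Int := (42, 10)

def Spec_converte (numBinario : Int) (base : Int) (out : String) : Prop := out = converte_alt numBinario base
instance (numBinario : Int) (base : Int) (out : String) : Decidable (Spec_converte numBinario base out) := by unfold Spec_converte; infer_instance

-- ===== CLAIM (what is proved, stated in full; the proofs are below) =====
def Claim_equal_converte : Prop := ∀ (numBinario : Int) (base : Int), Dom_converte numBinario base → Pre_converte numBinario base → Spec_converte numBinario base (converte numBinario base)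

-- ===== LEMMAS AND PROOFS =====

-- A's parse with the redundant cont==0 branch equals B's plain Horner fold
theorem pv_parse_eq (base : Int) (l : List Char) (cont : Int) :
    l.foldl (fun cont c =>
      if cont = 0 then 0 * base + pvDigit c else cont * base + pvDigit c) cont
    = l.foldl (fun cont c => cont * base + pvDigit c) cont := by
  induction l generalizing cont with
  | nil => rfl
  | cons c l ih =>
    simp only [List.foldl_cons]
    rw [← ih]
    congr 1
    split
    · next h => rw [h]
    · rfl

theorem pv_join_cons (s : String) (parts : List String) :
    PySem.Str.join "" (s :: parts) = s ++ PySem.Str.join "" parts := by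
  apply String.toList_inj.mp
  simp [PySem.Str.join]
  cases parts with
  | nil => simp [PySem.Chars.join_singleton, PySem.Chars.join_nil]
  | cons b l => simp [PySem.Chars.join_cons_cons]

-- the joined reversed while-loop list is exactly to_base's output (glued in front)
theorem pv_while_eq (fuel : Nat) (m i : Int) (total : List String) :
    PySem.Str.join "" (convWhile fuel m i total).reverse
    = toBase fuel m i ++ PySem.Str.join "" total.reverse := by
  induction fuel generalizing m total with
  | zero =>
    apply String.toList_inj.mp
    simp [convWhile, toBase]
  | succ f ih =>
    simp only [convWhile, toBase]
    split
    · next h =>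
      have hne : ¬ m ≤ 0 := by omega
      rw [ih]
      simp only [hne, if_false, List.reverse_append, List.reverse_singleton,
        List.singleton_append, pv_join_cons]
      apply String.toList_inj.mp
      simp
    · next h =>
      have hle : m ≤ 0 := by omega
      simp only [hle, if_true]
      apply String.toList_inj.mp
      simp

-- foldl that appends one element per i is List.map
theorem pv_foldl_map {α β : Type} (g : α → β) (l : List α) (acc : List β) :
    l.foldl (fun acc i => acc ++ [g i]) acc = acc ++ l.map g := by
  induction l generalizing acc with
  | nil => simp
  | cons x l ih => simp [List.foldl, ih]

-- ===== VERDICT (by name: the statement is the Claim_ definition above) =====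
theorem converte_spec : Claim_equal_converte := by
  intro numBinario base _ _
  unfold Spec_converte converte converte_alt
  simp only [pv_parse_eq, pv_foldl_map, List.nil_append]
  congr 1
  apply List.map_congr_left
  intro i _
  rw [pv_while_eq]
  apply String.toList_inj.mp
  simp [PySem.Str.join, PySem.Chars.join_nil]
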